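-- pv_equiv track=rewrite | github.com/webClone/AgriWise | services/agribrain/drone_photogrammetry/benchmark/cases_real.py | _apply_motion_blur
-- ===== SOURCE A (Python) =====
-- from typing import Dict, List, Optional
--
-- def _apply_motion_blur(pixels: Dict) -> Dict:
--     """Horizontal box blur (5-tap) simulating motion at strip endpoints."""
--     for ch in ("red", "green", "blue"):
--         data = pixels[ch]
--         h, w = len(data), len(data[0])
--         for y in range(h):
--             row_copy = list(data[y])
--             for x in range(2, w - 2):
--                 data[y][x] = (
--                     row_copy[x - 2] + row_copy[x - 1] + row_copy[x]
--                     + row_copy[x + 1] + row_copy[x + 2]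
--                 ) // 5
--     return pixels
-- ===== SOURCE B (Python) =====
-- def _apply_motion_blur(pixels):
--     """Horizontal 5-tap box blur via a per-row prefix-sum table (return value equals A's;
--     rows are replaced rather than written element-by-element)."""
--     for ch in ("red", "green", "blue"):
--         data = pixels[ch]
--         w = len(data[0])
--         for y in range(len(data)):
--             row = data[y]
--             prefix = [0]
--             for v in row:
--                 prefix.append(prefix[-1] + v)
--             data[y] = [
--                 (prefix[x + 3] - prefix[x - 2]) // 5 if 2 <= x < w - 2 else row[x]
--                 for x in range(len(row))
--             ]
--     return pixels
-- ===== Notes on version B (the rewrite author's own statement) =====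
-- stated objective: alternative
-- what changed: Each row's blurred values are computed from a prefix-sum table built once per row (data[y][x] = (P[x+3]-P[x-2])//5) and the row is rebuilt in one comprehension, instead of re-adding the five taps and writing each cell in place; Pre_ excludes exactly the inputs on which A raises (missing channel key, empty grid, or a too-short row).
-- outside the precondition, e.g. on _apply_motion_blur({}): A raises KeyError, B raises KeyError
import Mathlib
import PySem

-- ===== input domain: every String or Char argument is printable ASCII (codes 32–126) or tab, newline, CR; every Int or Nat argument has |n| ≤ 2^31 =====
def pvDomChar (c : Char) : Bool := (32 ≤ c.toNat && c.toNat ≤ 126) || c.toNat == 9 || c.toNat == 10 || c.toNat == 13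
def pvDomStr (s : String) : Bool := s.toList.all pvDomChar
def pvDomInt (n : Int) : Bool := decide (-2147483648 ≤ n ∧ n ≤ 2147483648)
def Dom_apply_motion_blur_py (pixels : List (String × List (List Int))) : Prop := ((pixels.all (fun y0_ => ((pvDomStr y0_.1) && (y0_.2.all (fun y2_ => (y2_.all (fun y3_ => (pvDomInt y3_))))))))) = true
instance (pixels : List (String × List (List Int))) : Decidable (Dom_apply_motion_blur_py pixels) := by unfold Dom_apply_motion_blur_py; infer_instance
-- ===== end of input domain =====

-- B rebuilds each row from a per-row prefix-sum table instead of re-adding the five taps per cell.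
-- Both Pythons mutate their dict argument in place; the equivalence proved here is about the RETURN value.

-- shared dict primitives (Python `pixels[ch]` read and the in-place write-back, first-match)
def pvGetItem (px : List (String × List (List Int))) (ch : String) : List (List Int) :=
  match px with
  | [] => []                                -- KeyError in Python; excluded by Pre_
  | (k, v) :: t => if k = ch then v else pvGetItem t ch

def pvSetItem (px : List (String × List (List Int))) (ch : String) (v : List (List Int)) :
    List (String × List (List Int)) :=
  match px with
  | [] => []
  | (k, w) :: t => if k = ch then (k, v) :: t else (k, w) :: pvSetItem t ch v

-- ===== PORT A =====
-- the five-tap sum A recomputes at each x, read from the row snapshot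
def pvBlurSum (c : List Int) (x : Int) : Int :=
  PySem.Int.floordiv
    (PySem.List.pyGetD c (x - 2) 0 + PySem.List.pyGetD c (x - 1) 0 + PySem.List.pyGetD c x 0 +
      PySem.List.pyGetD c (x + 1) 0 + PySem.List.pyGetD c (x + 2) 0) 5

-- inner loop `for x in range(2, w-2): data[y][x] = …` (reads from row_copy, writes in place)
def pvARow (w : Int) (row_copy : List Int) : List Int :=
  (PySem.List.pyRange 2 (w - 2) 1).foldl
    (fun r x => PySem.List.pySetD r x (pvBlurSum row_copy x)) row_copy

def pvAChannel (data : List (List Int)) : List (List Int) :=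
  let h : Int := (data.length : Int)
  let w : Int := ((PySem.List.pyGetD data 0 []).length : Int)
  (PySem.List.pyRange 0 h 1).foldl
    (fun d y =>
      let row_copy := PySem.List.pyGetD d y []
      PySem.List.pySetD d y (pvARow w row_copy)) data

def apply_motion_blur_py (pixels : List (String × List (List Int))) : List (String × List (List Int)) :=
  (["red", "green", "blue"] : List String).foldl
    (fun px ch => pvSetItem px ch (pvAChannel (pvGetItem px ch))) pixels

-- ===== PORT B =====
-- per-row prefix-sum table: prefix = [0]; for v in row: prefix.append(prefix[-1] + v)
def pvPrefix (row : List Int) : List Int :=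
  row.foldl (fun p v => p ++ [PySem.List.pyGetD p (-1) 0 + v]) [0]

-- the row comprehension: blurred value from the table inside [2, w-2), original cell elsewhere
def pvBRow (w : Int) (row : List Int) : List Int :=
  let p := pvPrefix row
  (PySem.List.pyRange 0 (row.length : Int) 1).map (fun x =>
    if 2 ≤ x ∧ x < w - 2 then
      PySem.Int.floordiv (PySem.List.pyGetD p (x + 3) 0 - PySem.List.pyGetD p (x - 2) 0) 5
    else PySem.List.pyGetD row x 0)

def pvBChannel (data : List (List Int)) : List (List Int) :=
  let w : Int := ((PySem.List.pyGetD data 0 []).length : Int)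
  (PySem.List.pyRange 0 (data.length : Int) 1).foldl
    (fun d y => PySem.List.pySetD d y (pvBRow w (PySem.List.pyGetD d y []))) data

def apply_motion_blur_py_alt (pixels : List (String × List (List Int))) : List (String × List (List Int)) :=
  (["red", "green", "blue"] : List String).foldl
    (fun px ch => pvSetItem px ch (pvBChannel (pvGetItem px ch))) pixels

-- ===== PRECONDITION & SPEC =====
-- a channel grid on which A's loops return: nonempty, and when w = len(data[0]) ≥ 5 every row has length ≥ w
def pvChanOk (d : List (List Int)) : Bool :=
  !d.isEmpty && ((d.headD []).length ≤ 4 || d.all (fun row => (d.headD []).length ≤ row.length))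

-- Pre_ excludes exactly the inputs on which A raises: a missing "red"/"green"/"blue" key (KeyError),
-- an empty channel grid (IndexError on data[0]), or a row shorter than w = len(data[0]) with w ≥ 5
-- (IndexError); pvChanOk [] = false, so a missing key (lookup = none) is excluded by the same clause.
def Pre_apply_motion_blur_py (pixels : List (String × List (List Int))) : Prop :=
  ∀ ch ∈ (["red", "green", "blue"] : List String),
    pvChanOk ((pixels.lookup ch).getD []) = true

instance (pixels : List (String × List (List Int))) : Decidable (Pre_apply_motion_blur_py pixels) := by
  unfold Pre_apply_motion_blur_py; infer_instance

def pvWitness_apply_motion_blur_py : (List (String × List (List Int))) :=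
  [("red", [[1, 2, 3, 4, 5]]), ("green", [[0]]), ("blue", [[7, 7]])]

def Spec_apply_motion_blur_py (pixels : List (String × List (List Int))) (out : List (String × List (List Int))) : Prop := out = apply_motion_blur_py_alt pixels
instance (pixels : List (String × List (List Int))) (out : List (String × List (List Int))) : Decidable (Spec_apply_motion_blur_py pixels out) := by unfold Spec_apply_motion_blur_py; infer_instance

-- ===== CLAIM (what is proved, stated in full; the proofs are below) =====
def Claim_equal_apply_motion_blur_py : Prop := ∀ (pixels : List (String × List (List Int))), Dom_apply_motion_blur_py pixels → Pre_apply_motion_blur_py pixels → Spec_apply_motion_blur_py pixels (apply_motion_blur_py pixels)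

-- ===== LEMMAS AND PROOFS =====

theorem pvGetItem_eq_lookup (px : List (String × List (List Int))) (ch : String) :
    pvGetItem px ch = (px.lookup ch).getD [] := by
  induction px with
  | nil => rfl
  | cons hd t ih =>
      obtain ⟨k, v⟩ := hd
      by_cases hk : k = ch
      · subst hk; simp [pvGetItem, List.lookup]
      · have hne : (ch == k) = false := by
          rw [beq_eq_false_iff_ne]
          exact fun h => hk h.symm
        simp only [pvGetItem, if_neg hk, List.lookup, hne]
        exact ih

theorem pvGetItem_setItem_ne (px : List (String × List (List Int))) (ch k : String)
    (v : List (List Int)) (h : k ≠ ch) : pvGetItem (pvSetItem px ch v) k = pvGetItem px k := by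
  induction px with
  | nil => rfl
  | cons hd t ih =>
      obtain ⟨k0, v0⟩ := hd
      by_cases hk : k0 = ch
      · subst hk
        have hne : ¬ k0 = k := fun hh => h hh.symm
        simp [pvSetItem, pvGetItem, hne]
      · simp only [pvSetItem, if_neg hk, pvGetItem]
        split <;> simp [*]

-- the running-sum tail of B's prefix table (proof-only helper)
def pvRun (s : Int) : List Int → List Int
  | [] => []
  | v :: t => (s + v) :: pvRun (s + v) t

theorem pvPrefix_aux (row : List Int) : ∀ (p : List Int) (hp : p ≠ []),
    row.foldl (fun p v => p ++ [PySem.List.pyGetD p (-1) 0 + v]) p = p ++ pvRun (p.getLast hp) row := by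
  induction row with
  | nil => intro p hp; simp [pvRun]
  | cons v t ih =>
      intro p hp
      have h1 : PySem.List.pyGetD p (-1) 0 = p.getLast hp := PySem.List.pyGetD_neg_one p 0 hp
      simp only [List.foldl_cons, h1]
      rw [ih (p ++ [p.getLast hp + v]) (by simp)]
      simp [pvRun]

theorem pvRun_getElem (row : List Int) : ∀ (s : Int) (k : Nat), k < row.length →
    (pvRun s row)[k]? = some (s + (row.take (k + 1)).sum) := by
  induction row with
  | nil => intro s k hk; simp at hk
  | cons v t ih =>
      intro s k hk
      cases k with
      | zero => simp [pvRun]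
      | succ k =>
          simp only [pvRun, List.getElem?_cons_succ]
          rw [ih (s + v) k (by simpa using hk)]
          simp [add_assoc]

-- P[j] = sum of the first j row entries, for 0 ≤ j ≤ len(row)
theorem pvPrefix_getD (row : List Int) (j : Int) (h0 : 0 ≤ j) (hj : j ≤ (row.length : Int)) :
    PySem.List.pyGetD (pvPrefix row) j 0 = (row.take j.toNat).sum := by
  have hpre : pvPrefix row = 0 :: pvRun 0 row := by
    unfold pvPrefix
    rw [pvPrefix_aux row [0] (by simp)]
    simp
  rw [hpre, PySem.List.pyGetD_of_nonneg _ _ h0]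
  rcases Nat.eq_zero_or_pos j.toNat with hz | hpos
  · simp [hz]
  · obtain ⟨m, hm⟩ := Nat.exists_eq_succ_of_ne_zero (Nat.pos_iff_ne_zero.mp hpos)
    rw [hm]
    have hmlt : m < row.length := by omega
    simp only [List.getD, List.getElem?_cons_succ]
    rw [pvRun_getElem row 0 m hmlt]
    simp

-- setting one cell of a range-comprehension list updates the generating function at that point
theorem pvSet_map_pyRange (g : Int → Int) (n k : Nat) (_hk : k < n) (v : Int) :
    ((PySem.List.pyRange 0 (n : Int) 1).map g).set k v
      = (PySem.List.pyRange 0 (n : Int) 1).map (fun x => if x = (k : Int) then v else g x) := by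
  apply List.ext_getElem
  · simp
  · intro i h1 h2
    have hi : i < n := by
      have := h1
      simp [PySem.List.length_pyRange_one] at this
      omega
    simp only [List.getElem_set, List.getElem_map, PySem.List.getElem_pyRange_one]
    by_cases hik : i = k
    · simp [hik]
    · have hki : ¬ k = i := fun h => hik h.symm
      simp [hik, hki]

-- A's inner write loop, characterised as a comprehension over the whole row
theorem pvFold_set_range (s : Int → Int) (row : List Int) :
    ∀ (n : Nat) (b : Int), (b - 2).toNat = n → b ≤ (row.length : Int) →
    (PySem.List.pyRange 2 b 1).foldl (fun r x => PySem.List.pySetD r x (s x)) row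
      = (PySem.List.pyRange 0 (row.length : Int) 1).map
          (fun x => if 2 ≤ x ∧ x < b then s x else PySem.List.pyGetD row x 0) := by
  intro n
  induction n with
  | zero =>
      intro b hb _
      have hb2 : b ≤ 2 := by omega
      rw [PySem.List.pyRange_one_eq_nil hb2]
      simp only [List.foldl_nil]
      rw [List.map_congr_left (g := fun x => PySem.List.pyGetD row x 0) ?_]
      · rw [PySem.List.map_pyGetD_pyRange_zero']
      · intro x hx
        have hmem := PySem.List.mem_pyRange_one.mp hx
        rw [if_neg (by omega)]
  | succ m ih =>
      intro b hb hble
      have hb2 : 2 ≤ b - 1 := by omega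
      have hsplit : PySem.List.pyRange 2 b 1 = PySem.List.pyRange 2 (b - 1) 1 ++ [b - 1] := by
        have := PySem.List.pyRange_one_succ_right (a := 2) (b := b - 1) hb2
        simpa using this
      rw [hsplit, List.foldl_append]
      rw [ih (b - 1) (by omega) (by omega)]
      simp only [List.foldl_cons, List.foldl_nil]
      have hk : (b - 1).toNat < row.length := by omega
      have hcast : ((b - 1).toNat : Int) = b - 1 := by omega
      rw [PySem.List.pySetD_of_nonneg _ _ (by omega)]
      rw [pvSet_map_pyRange _ row.length (b - 1).toNat hk]
      apply List.map_congr_left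
      intro x hx
      have hmem := PySem.List.mem_pyRange_one.mp hx
      by_cases hxe : x = b - 1
      · rw [if_pos (by omega), if_pos (by omega)]
        rw [hxe]
      · rw [if_neg (by omega)]
        by_cases hcond : 2 ≤ x ∧ x < b - 1
        · rw [if_pos hcond, if_pos (by omega)]
        · rw [if_neg hcond, if_neg (by omega)]

-- the prefix-table difference is the five-tap sum
theorem pvPrefix_diff (row : List Int) (x : Int) (h2 : 2 ≤ x) (hx : x < (row.length : Int) - 2) :
    PySem.List.pyGetD (pvPrefix row) (x + 3) 0 - PySem.List.pyGetD (pvPrefix row) (x - 2) 0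
      = PySem.List.pyGetD row (x - 2) 0 + PySem.List.pyGetD row (x - 1) 0 + PySem.List.pyGetD row x 0 +
          PySem.List.pyGetD row (x + 1) 0 + PySem.List.pyGetD row (x + 2) 0 := by
  have hlen : x + 3 ≤ (row.length : Int) := by omega
  rw [pvPrefix_getD row (x + 3) (by omega) (by omega),
      pvPrefix_getD row (x - 2) (by omega) (by omega)]
  rw [PySem.List.pyGetD_eq_getElem row (i := x - 2) 0 (by omega) (by omega),
      PySem.List.pyGetD_eq_getElem row (i := x - 1) 0 (by omega) (by omega),
      PySem.List.pyGetD_eq_getElem row (i := x) 0 (by omega) (by omega),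
      PySem.List.pyGetD_eq_getElem row (i := x + 1) 0 (by omega) (by omega),
      PySem.List.pyGetD_eq_getElem row (i := x + 2) 0 (by omega) (by omega)]
  obtain ⟨m, hm⟩ : ∃ m, (x - 2).toNat = m := ⟨_, rfl⟩
  have e1 : (x - 1).toNat = m + 1 := by omega
  have e2 : x.toNat = m + 2 := by omega
  have e3 : (x + 1).toNat = m + 3 := by omega
  have e4 : (x + 2).toNat = m + 4 := by omega
  have e5 : (x + 3).toNat = m + 5 := by omega
  simp only [hm, e1, e2, e3, e4, e5]
  have hm5 : m + 5 ≤ row.length := by omega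
  have t1 : (row.take (m + 1)).sum = (row.take m).sum + row[m]'(by omega) := by
    simpa using List.sum_take_succ row m (by omega)
  have t2 : (row.take (m + 2)).sum = (row.take (m + 1)).sum + row[m + 1]'(by omega) := by
    simpa using List.sum_take_succ row (m + 1) (by omega)
  have t3 : (row.take (m + 3)).sum = (row.take (m + 2)).sum + row[m + 2]'(by omega) := by
    simpa using List.sum_take_succ row (m + 2) (by omega)
  have t4 : (row.take (m + 4)).sum = (row.take (m + 3)).sum + row[m + 3]'(by omega) := by
    simpa using List.sum_take_succ row (m + 3) (by omega)
  have t5 : (row.take (m + 5)).sum = (row.take (m + 4)).sum + row[m + 4]'(by omega) := by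
    simpa using List.sum_take_succ row (m + 4) (by omega)
  omega

theorem pvRow_eq (w : Int) (row : List Int) (hok : w ≤ 4 ∨ w ≤ (row.length : Int)) :
    pvARow w row = pvBRow w row := by
  unfold pvARow pvBRow
  simp only []
  by_cases hw4 : w ≤ 4
  · rw [PySem.List.pyRange_one_eq_nil (by omega)]
    simp only [List.foldl_nil]
    rw [List.map_congr_left (g := fun x => PySem.List.pyGetD row x 0) ?_]
    · rw [PySem.List.map_pyGetD_pyRange_zero']
    · intro x hx
      have hmem := PySem.List.mem_pyRange_one.mp hx
      rw [if_neg (by omega)]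
  · have hwlen : w ≤ (row.length : Int) := by omega
    rw [pvFold_set_range (pvBlurSum row) row (w - 2 - 2).toNat (w - 2) rfl (by omega)]
    apply List.map_congr_left
    intro x hx
    by_cases hcond : 2 ≤ x ∧ x < w - 2
    · rw [if_pos hcond, if_pos hcond]
      rw [pvPrefix_diff row x hcond.1 (by omega)]
      rfl
    · rw [if_neg hcond, if_neg hcond]

-- a fold that replaces each row by F of its (still untouched) old value is a map
theorem pvFold_set_rows (F : List Int → List Int) (data : List (List Int)) :
    (PySem.List.pyRange 0 (data.length : Int) 1).foldl
        (fun d y => PySem.List.pySetD d y (F (PySem.List.pyGetD d y []))) data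
      = data.map F := by
  have key : ∀ k : Nat, k ≤ data.length →
      (PySem.List.pyRange 0 (k : Int) 1).foldl
          (fun d y => PySem.List.pySetD d y (F (PySem.List.pyGetD d y []))) data
        = (data.take k).map F ++ data.drop k := by
    intro k
    induction k with
    | zero => intro _; simp [PySem.List.pyRange_one_eq_nil]
    | succ k ih =>
        intro hk
        have hklt : k < data.length := by omega
        have hcast : ((k + 1 : Nat) : Int) = (k : Int) + 1 := by push_cast; ring
        rw [hcast, PySem.List.pyRange_one_succ_right (by omega), List.foldl_append]
        rw [ih (by omega)]
        simp only [List.foldl_cons, List.foldl_nil]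
        have hdrop : data.drop k = data[k] :: data.drop (k + 1) :=
          List.drop_eq_getElem_cons hklt
        have hlen : ((data.take k).map F).length = k := by
          simp [List.length_take, Nat.min_eq_left (le_of_lt hklt)]
        have hget : PySem.List.pyGetD ((data.take k).map F ++ data.drop k) (k : Int) [] = data[k] := by
          rw [PySem.List.pyGetD_natCast, List.getD_eq_getElem?_getD,
              List.getElem?_append_right (by omega), hlen, Nat.sub_self, hdrop]
          simp [List.getElem?_eq_getElem hklt]
        rw [hget, PySem.List.pySetD_natCast]
        rw [hdrop, List.set_append_right _ _ (by omega)]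
        simp only [hlen, Nat.sub_self, List.set_cons_zero]
        have htake : (data.take (k + 1)).map F = (data.take k).map F ++ [F data[k]] := by
          rw [List.take_add_one, List.map_append]
          simp [List.getElem?_eq_getElem hklt]
        rw [htake]
        simp
  have := key data.length (le_refl _)
  simpa using this

theorem pvChannel_eq (data : List (List Int)) (h : pvChanOk data = true) :
    pvAChannel data = pvBChannel data := by
  unfold pvAChannel pvBChannel
  simp only []
  rw [pvFold_set_rows (pvARow ((PySem.List.pyGetD data 0 []).length : Int)) data,
      pvFold_set_rows (pvBRow ((PySem.List.pyGetD data 0 []).length : Int)) data]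
  apply List.map_congr_left
  intro row hrow
  apply pvRow_eq
  unfold pvChanOk at h
  simp only [Bool.and_eq_true, Bool.or_eq_true, decide_eq_true_eq, List.all_eq_true] at h
  obtain ⟨hne, hcase⟩ := h
  have hhead : PySem.List.pyGetD data 0 [] = data.headD [] := by
    cases data with
    | nil => rfl
    | cons a t => simp [PySem.List.pyGetD_zero_cons]
  rw [hhead]
  rcases hcase with h4 | hall
  · left; exact_mod_cast h4
  · right; exact_mod_cast hall row hrow

-- ===== VERDICT (by name: the statement is the Claim_ definition above) =====
theorem apply_motion_blur_py_spec : Claim_equal_apply_motion_blur_py := by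
  intro pixels _ hPre
  unfold Spec_apply_motion_blur_py apply_motion_blur_py apply_motion_blur_py_alt
  simp only [List.foldl_cons, List.foldl_nil]
  have hgr : ("green" : String) ≠ "red" := by decide
  have hbr : ("blue" : String) ≠ "red" := by decide
  have hbg : ("blue" : String) ≠ "green" := by decide
  simp only [pvGetItem_setItem_ne _ _ _ _ hgr, pvGetItem_setItem_ne _ _ _ _ hbg,
    pvGetItem_setItem_ne _ _ _ _ hbr]
  have hch : ∀ ch ∈ (["red", "green", "blue"] : List String),
      pvChanOk (pvGetItem pixels ch) = true := by
    intro ch hmem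
    rw [pvGetItem_eq_lookup]
    exact hPre ch hmem
  have hr := pvChannel_eq _ (hch "red" (by simp))
  have hg := pvChannel_eq _ (hch "green" (by simp))
  have hb := pvChannel_eq _ (hch "blue" (by simp))
  rw [hr, hg, hb]
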